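-- pv_equiv track=rewrite | github.com/ayukyo/alltoolkit | Python/cookie_utils/mod.py | validate_cookie_value
-- ===== SOURCE A (Python) =====
-- def validate_cookie_value(value: str) -> bool:
--     """
--     Validate a cookie value according to RFC 6265.
--
--     Cookie values can contain ASCII characters except:
--     Control characters, space, tab, comma, semicolon, double quote
--
--     Args:
--         value: The cookie value to validate
--
--     Returns:
--         True if the value is valid
--     """
--     if not value:
--         return True  # Empty values are allowed
--
--     for char in value:
--         if ord(char) < 32 or ord(char) > 126:
--             return False
--         if char in ' ";,':
--             return False
--
--     return True
-- ===== SOURCE B (Python) =====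
-- def validate_cookie_value(value: str) -> bool:
--     if not value:
--         return True
--     codes = [ord(c) for c in value]
--     if min(codes) < 33 or max(codes) > 126:
--         return False
--     return set(value).isdisjoint('",;')
-- ===== Notes on version B (the rewrite author's own statement) =====
-- stated objective: alternative
-- what changed: Replaces A's single per-character loop with early returns by staged whole-string aggregates: map to code points, a global min/max bound check on 33..126 (which absorbs A's space exclusion), then a set-disjointness test against the three forbidden punctuation characters.
import Mathlib
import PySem

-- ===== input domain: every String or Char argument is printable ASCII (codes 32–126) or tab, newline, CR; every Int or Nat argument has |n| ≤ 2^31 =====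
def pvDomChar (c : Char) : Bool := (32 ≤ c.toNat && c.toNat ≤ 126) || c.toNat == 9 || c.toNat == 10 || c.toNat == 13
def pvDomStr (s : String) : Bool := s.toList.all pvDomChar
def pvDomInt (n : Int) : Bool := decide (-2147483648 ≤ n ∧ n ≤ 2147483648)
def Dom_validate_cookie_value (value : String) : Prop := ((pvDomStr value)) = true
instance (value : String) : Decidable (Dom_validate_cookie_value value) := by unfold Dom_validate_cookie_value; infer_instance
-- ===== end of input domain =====

-- B replaces A's per-character loop by staged whole-string aggregates: a min/max bound
-- check on the code points followed by a set-disjointness test (alternative decomposition).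


-- ===== PORT A =====
-- the 'for char in value' loop with its two early 'return False' branches
def pvLoopA : List Char → Bool
  | [] => true
  | c :: rest =>
    if c.toNat < 32 || 126 < c.toNat then false
    else if (" \";,".toList).contains c then false  -- char in ' ";,'
    else pvLoopA rest

def validate_cookie_value (value : String) : Bool :=
  if value.toList.isEmpty then true   -- if not value: return True
  else pvLoopA value.toList

-- ===== PORT B =====
def validate_cookie_value_alt (value : String) : Bool :=
  if value.toList.isEmpty then true   -- if not value: return True
  else
    -- codes = [ord(c) for c in value]
    let codes : List Int := value.toList.map (fun c => (c.toNat : Int))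
    -- if min(codes) < 33 or max(codes) > 126: return False
    match PySem.List.min? codes (fun x => x), PySem.List.max? codes (fun x => x) with
    | some mn, some mx =>
        if mn < 33 || 126 < mx then false
        -- return set(value).isdisjoint('",;')
        else PySem.Set.isdisjoint (PySem.Set.ofList value.toList) ("\",;".toList)
    | _, _ => false   -- unreachable: codes is nonempty here

-- ===== PRECONDITION & SPEC =====
def Spec_validate_cookie_value (value : String) (out : Bool) : Prop := out = validate_cookie_value_alt value
instance (value : String) (out : Bool) : Decidable (Spec_validate_cookie_value value out) := by unfold Spec_validate_cookie_value; infer_instance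

-- ===== CLAIM (what is proved, stated in full; the proofs are below) =====
def Claim_equal_validate_cookie_value : Prop := ∀ (value : String), Dom_validate_cookie_value value → Spec_validate_cookie_value value (validate_cookie_value value)

-- ===== LEMMAS AND PROOFS =====

-- A's per-character test, as a predicate
def pvGood (c : Char) : Bool :=
  !(decide (c.toNat < 32) || decide (126 < c.toNat)) && !((" \";,".toList).contains c)

theorem pvLoopA_eq_all (l : List Char) : pvLoopA l = l.all pvGood := by
  induction l with
  | nil => rfl
  | cons c rest ih =>
    simp only [pvLoopA, List.all_cons, ih, pvGood]
    rcases Bool.eq_false_or_eq_true (decide (c.toNat < 32) || decide (126 < c.toNat)) with h1 | h1 <;>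
    rcases Bool.eq_false_or_eq_true ((" \";,".toList).contains c) with h2 | h2 <;>
      simp [h1, h2]

-- B's combined test, per character
def pvGoodB (c : Char) : Bool :=
  (decide (33 ≤ c.toNat) && decide (c.toNat ≤ 126)) && !(("\",;".toList).contains c)

theorem pvChar_eq_of_toNat {a b : Char} (h : a.toNat = b.toNat) : a = b := by
  apply Char.ext
  have h' : a.val.toNat = b.val.toNat := h
  exact UInt32.toNat_inj.mp (by simpa using h')

theorem pvGood_eq_goodB (c : Char) : pvGood c = pvGoodB c := by
  by_cases h32 : c.toNat = 32
  · have hc : c = ' ' := pvChar_eq_of_toNat (by simpa using h32); subst hc; decide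
  by_cases h34 : c.toNat = 34
  · have hc : c = '\"' := pvChar_eq_of_toNat (by simpa using h34); subst hc; decide
  by_cases h44 : c.toNat = 44
  · have hc : c = ',' := pvChar_eq_of_toNat (by simpa using h44); subst hc; decide
  by_cases h59 : c.toNat = 59
  · have hc : c = ';' := pvChar_eq_of_toNat (by simpa using h59); subst hc; decide
  have hne : ∀ d : Char, c = d → c.toNat = d.toNat := fun d h => by rw [h]
  have n1 : c ≠ ' ' := fun h => h32 (hne _ h)
  have n2 : c ≠ '\"' := fun h => h34 (hne _ h)
  have n3 : c ≠ ',' := fun h => h44 (hne _ h)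
  have n4 : c ≠ ';' := fun h => h59 (hne _ h)
  have e1 : (" \";,".toList) = [' ', '\"', ';', ','] := rfl
  have e2 : ("\",;".toList) = ['\"', ',', ';'] := rfl
  rw [pvGood, pvGoodB, e1, e2]
  simp only [List.contains_eq_mem, List.mem_cons, List.not_mem_nil,
    n1, n2, n3, n4, or_self, decide_false, Bool.not_false, Bool.and_true]
  rw [Bool.eq_iff_iff]
  simp only [Bool.not_eq_true', Bool.or_eq_false_iff, decide_eq_false_iff_not, not_lt,
    Bool.and_eq_true, decide_eq_true_eq]
  omega

theorem pvAll_good_eq_goodB (l : List Char) : l.all pvGood = l.all pvGoodB := by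
  induction l with
  | nil => rfl
  | cons c rest ih => simp only [List.all_cons, ih, pvGood_eq_goodB]

theorem validate_cookie_value_spec : Claim_equal_validate_cookie_value := by
  intro value _
  unfold Spec_validate_cookie_value validate_cookie_value validate_cookie_value_alt
  cases hl : value.toList with
  | nil => simp
  | cons c rest =>
    simp only [List.isEmpty_cons, Bool.false_eq_true, if_false]
    rw [pvLoopA_eq_all, pvAll_good_eq_goodB]
    rcases hmn : PySem.List.min? ((c :: rest).map (fun c => (c.toNat : Int))) (fun x => x)
      with _ | mn
    · rw [PySem.List.min?_eq_none_iff] at hmn; exact absurd hmn (by simp)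
    rcases hmx : PySem.List.max? ((c :: rest).map (fun c => (c.toNat : Int))) (fun x => x)
      with _ | mx
    · rw [PySem.List.max?_eq_none_iff] at hmx; exact absurd hmx (by simp)
    simp only [hmn, hmx]
    by_cases hb : (mn < 33 ∨ 126 < mx)
    · -- some character is out of range: both sides are false
      have hex : ∃ x ∈ (c :: rest), pvGoodB x = false := by
        rcases hb with hb | hb
        · rcases List.mem_map.mp (PySem.List.min?_mem hmn) with ⟨x, hx, hxe⟩
          refine ⟨x, hx, ?_⟩
          simp only [pvGoodB, Bool.and_eq_false_iff]
          left; left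
          simp only [decide_eq_false_iff_not, not_le]; omega
        · rcases List.mem_map.mp (PySem.List.max?_mem hmx) with ⟨x, hx, hxe⟩
          refine ⟨x, hx, ?_⟩
          simp only [pvGoodB, Bool.and_eq_false_iff]
          left; right
          simp only [decide_eq_false_iff_not, not_le]; omega
      rcases hex with ⟨x, hx, hgx⟩
      have hall : (c :: rest).all pvGoodB = false := by
        apply List.all_eq_false.mpr
        exact ⟨x, hx, by simp [hgx]⟩
      have hif : (decide (mn < 33) || decide (126 < mx)) = true := by
        rcases hb with hb | hb <;> simp [hb]
      rw [hall, hif]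
      simp
    · -- all characters in range: both sides reduce to the membership test
      push Not at hb
      have hrange : ∀ x ∈ (c :: rest), 33 ≤ x.toNat ∧ x.toNat ≤ 126 := by
        intro x hx
        have hmem : ((x.toNat : Int)) ∈ (c :: rest).map (fun c => (c.toNat : Int)) :=
          List.mem_map.mpr ⟨x, hx, rfl⟩
        have h1 := PySem.List.min?_isMin hmn _ hmem
        have h2 := PySem.List.max?_isMax hmx _ hmem
        simp only at h1 h2
        constructor <;> omega
      have hif : (decide (mn < 33) || decide (126 < mx)) = false := by
        simp only [Bool.or_eq_false_iff, decide_eq_false_iff_not, not_lt]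
        exact ⟨hb.1, hb.2⟩
      rw [hif]
      simp only [Bool.false_eq_true, if_false]
      rw [Bool.eq_iff_iff]
      simp only [List.all_eq_true, PySem.Set.isdisjoint_iff, PySem.Set.mem_ofList]
      constructor
      · intro h x hx
        have := h x hx
        simp only [pvGoodB, Bool.and_eq_true, Bool.not_eq_true',
          List.contains_eq_mem, decide_eq_false_iff_not] at this
        exact this.2
      · intro h x hx
        have hr := hrange x hx
        have hm := h x hx
        simp only [pvGoodB, Bool.and_eq_true, Bool.not_eq_true',
          List.contains_eq_mem, decide_eq_false_iff_not, decide_eq_true_eq]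
        exact ⟨⟨hr.1, hr.2⟩, hm⟩
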